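-- pv_equiv track=rewrite | github.com/cooga/TalentIntel | extended_search_20260321.py | is_chinese_name
-- ===== SOURCE A (Python) =====
-- CHINESE_SURNAMES = [
--     "chen", "wang", "li", "liu", "zhang", "zhao", "lin", "yang", "wu", "zhou",
--     "huang", "xu", "sun", "hu", "ma", "guo", "he", "zheng", "xie", "song",
--     "tang", "feng", "deng", "ye", "cheng", "cai", "cao", "jiang", "jin",
--     "luo", "gao", "zheng", "xiao", "han", "wei", "xue", "yan", "dong",
--     "pan", "zhu", "gan", "yu", "shen", "dang", "duan", "tan", "lai", "shi"
-- ]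
--
-- def is_chinese_name(name: str) -> bool:
--     if not name:
--         return False
--     name_lower = name.lower()
--     for surname in CHINESE_SURNAMES:
--         if name_lower.startswith(surname + " ") or name_lower == surname:
--             return True
--         if f" {surname}" in name_lower:
--             return True
--     return False
-- ===== SOURCE B (Python) =====
-- # The 47 distinct surnames of the module's CHINESE_SURNAMES list, kept as one
-- # blob string and hashed into a frozenset for O(1) membership tests.
-- _SURNAME_SET = frozenset(
--     "chen wang li liu zhang zhao lin yang wu zhou "
--     "huang xu sun hu ma guo he zheng xie song "
--     "tang feng deng ye cheng cai cao jiang jin "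
--     "luo gao xiao han wei xue yan dong "
--     "pan zhu gan yu shen dang duan tan lai shi".split()
-- )
-- _SURNAME_LENGTHS = (2, 3, 4, 5)  # every surname is 2..5 letters long
--
--
-- def is_chinese_name(name: str) -> bool:
--     if not name:
--         return False
--     s = name.lower()
--     # a surname at the very start must be the whole string or be followed by a space
--     for k in _SURNAME_LENGTHS:
--         if s[:k] in _SURNAME_SET and s[k:k + 1] in ("", " "):
--             return True
--     # anywhere after a space, a window of any surname length may be a surname
--     for i, ch in enumerate(s):
--         if ch == " ":
--             for k in _SURNAME_LENGTHS:
--                 if s[i + 1:i + 1 + k] in _SURNAME_SET: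
--                     return True
--     return False
-- ===== Notes on version B (the rewrite author's own statement) =====
-- stated objective: alternative
-- what changed: Instead of scanning the name once per surname (48 startswith/equality/substring tests over a list), B builds a frozenset from one blob of surnames, lowercases once, and makes a single left-to-right pass checking the 2-5 character window at the start and after each space against the hash set; different traversal and data structure.
import Mathlib
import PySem

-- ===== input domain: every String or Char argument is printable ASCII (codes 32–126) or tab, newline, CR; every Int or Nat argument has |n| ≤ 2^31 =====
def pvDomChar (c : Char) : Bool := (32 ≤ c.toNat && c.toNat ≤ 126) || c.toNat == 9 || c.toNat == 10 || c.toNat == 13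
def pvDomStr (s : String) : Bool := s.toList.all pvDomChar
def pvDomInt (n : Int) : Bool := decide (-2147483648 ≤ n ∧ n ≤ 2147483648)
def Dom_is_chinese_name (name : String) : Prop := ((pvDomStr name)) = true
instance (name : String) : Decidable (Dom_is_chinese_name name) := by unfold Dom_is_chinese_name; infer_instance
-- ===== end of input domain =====

-- B replaces A's per-surname scans of the name (48 startswith/equality/substring tests over a
-- list of surnames) by one left-to-right pass that checks the 2..5-character window at the
-- start and after each space against a frozenset built from one blob of the distinct surnames
-- (objective: alternative single-pass algorithm over a hash set).

-- ===== PORT A =====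
-- the module constant CHINESE_SURNAMES (A's list, duplicate "zheng" included, as in the module)
def pvSurnames : List String := [
  "chen", "wang", "li", "liu", "zhang", "zhao", "lin", "yang", "wu", "zhou",
  "huang", "xu", "sun", "hu", "ma", "guo", "he", "zheng", "xie", "song",
  "tang", "feng", "deng", "ye", "cheng", "cai", "cao", "jiang", "jin",
  "luo", "gao", "zheng", "xiao", "han", "wei", "xue", "yan", "dong",
  "pan", "zhu", "gan", "yu", "shen", "dang", "duan", "tan", "lai", "shi"]

-- A: for each surname test startswith(surname+" "), ==, and " surname" substring (early return = any)
def is_chinese_name (name : String) : Bool :=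
  if name = "" then false
  else
    let name_lower := PySem.Str.lower name
    pvSurnames.any (fun surname =>
      (PySem.Str.startswith name_lower (surname ++ " ") || name_lower == surname)
        || PySem.Str.isIn (" " ++ surname) name_lower)

-- ===== PORT B =====
-- B's `_SURNAME_SET = frozenset("chen wang … shi".split())`
def pvSurnameBlob : String :=
  "chen wang li liu zhang zhao lin yang wu zhou huang xu sun hu ma guo he zheng xie song tang feng deng ye cheng cai cao jiang jin luo gao xiao han wei xue yan dong pan zhu gan yu shen dang duan tan lai shi"

def pvSurnameSet : PySem.Set String := PySem.Set.ofList (PySem.Str.split₀ pvSurnameBlob)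

def pvSurnameLengths : List Int := [2, 3, 4, 5]

-- `s[:k] in _SURNAME_SET and s[k:k+1] in ("", " ")`
def pvStartHit (s : String) (k : Int) : Bool :=
  pvSurnameSet.contains (PySem.Str.slice s none (some k))
    && (PySem.Str.slice s (some k) (some (k + 1)) == ""
        || PySem.Str.slice s (some k) (some (k + 1)) == " ")

-- inner loop of the window check: `s[i+1:i+1+k] in _SURNAME_SET` for the surname lengths
def pvWindowHit (s : String) (i : Int) : Bool :=
  pvSurnameLengths.any (fun k =>
    pvSurnameSet.contains (PySem.Str.slice s (some (i + 1)) (some (i + 1 + k))))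

def is_chinese_name_alt (name : String) : Bool :=
  if name = "" then false
  else
    let s := PySem.Str.lower name
    pvSurnameLengths.any (fun k => pvStartHit s k)
      || (PySem.List.enumerate s.toList).any (fun p => p.2 == ' ' && pvWindowHit s p.1)

-- ===== PRECONDITION & SPEC =====
def Spec_is_chinese_name (name : String) (out : Bool) : Prop := out = is_chinese_name_alt name
instance (name : String) (out : Bool) : Decidable (Spec_is_chinese_name name out) := by unfold Spec_is_chinese_name; infer_instance

-- ===== CLAIM (what is proved, stated in full; the proofs are below) =====
def Claim_equal_is_chinese_name : Prop := ∀ (name : String), Dom_is_chinese_name name → Spec_is_chinese_name name (is_chinese_name name)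

-- ===== LEMMAS AND PROOFS =====

-- the surnames as character lists (proof-side view of pvSurnames)
def pvCS : List (List Char) := pvSurnames.map String.toList

theorem pvCS_len_mem : ∀ c ∈ pvCS, ((c.length : Int)) ∈ pvSurnameLengths := by decide

theorem pv_len_nonneg : ∀ k ∈ pvSurnameLengths, (0 : Int) ≤ k := by decide

-- B's blob-split set holds exactly the distinct surnames of A's list (both evaluate)
set_option maxRecDepth 8192 in
theorem pvSet_eq : pvSurnameSet = PySem.Set.ofList pvSurnames := by decide

theorem pv_contains_iff (t : String) :
    pvSurnameSet.contains t = true ↔ t.toList ∈ pvCS := by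
  rw [pvSet_eq]
  simp only [PySem.Set.contains, List.contains_iff_mem,
    PySem.Set.mem_ofList, pvCS, List.mem_map]
  constructor
  · intro h; exact ⟨t, h, rfl⟩
  · rintro ⟨sur, hs, he⟩
    obtain rfl : sur = t := String.toList_inj.mp he
    exact hs

-- the three per-surname conditions of A, at character level
def pvCondA (c L : List Char) : Prop :=
  (c ++ [' '] <+: L) ∨ L = c ∨ ((' ' :: c) <:+: L)

theorem pv_startHit_iff (s : String) (k : Int) (hk : 0 ≤ k) :
    pvStartHit s k = true ↔
      (s.toList.take k.toNat ∈ pvCS ∧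
        ((s.toList.drop k.toNat).take 1 = [] ∨ (s.toList.drop k.toNat).take 1 = [' '])) := by
  have h1 : (PySem.Str.slice s none (some k)).toList = s.toList.take k.toNat := by
    rw [PySem.Str.toList_slice, PySem.Chars.slice_eq_listSlice, PySem.List.slice_to _ hk]
  have h2 : (PySem.Str.slice s (some k) (some (k + 1))).toList = (s.toList.drop k.toNat).take 1 := by
    simp [PySem.Str.toList_slice, PySem.Chars.slice_eq_listSlice,
      PySem.List.slice_toNat s.toList hk (by omega : (0:Int) ≤ k + 1)]
    congr 1
    omega
  constructor
  · intro h
    simp only [pvStartHit, Bool.and_eq_true, Bool.or_eq_true, beq_iff_eq] at h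
    obtain ⟨hc, hend⟩ := h
    refine ⟨by rw [← h1]; exact (pv_contains_iff _).mp hc, ?_⟩
    rcases hend with he | he
    · left; rw [← h2, he]; rfl
    · right; rw [← h2, he]; rfl
  · rintro ⟨hc, hend⟩
    simp only [pvStartHit, Bool.and_eq_true, Bool.or_eq_true, beq_iff_eq]
    refine ⟨(pv_contains_iff _).mpr (h1 ▸ hc), ?_⟩
    rcases hend with he | he
    · left; apply String.toList_inj.mp; rw [h2, he]; rfl
    · right; apply String.toList_inj.mp; rw [h2, he]; rfl

set_option maxRecDepth 4096 in
theorem pv_windowHit_iff (s : String) (j : Nat) :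
    pvWindowHit s (j : Int) = true ↔
      ∃ k ∈ pvSurnameLengths, (s.toList.drop (j + 1)).take k.toNat ∈ pvCS := by
  simp only [pvWindowHit, List.any_eq_true]
  constructor
  · rintro ⟨k, hk, hc⟩
    have hk0 : 0 ≤ k := pv_len_nonneg k hk
    refine ⟨k, hk, ?_⟩
    have hsl : (PySem.Str.slice s (some ((j : Int) + 1)) (some ((j : Int) + 1 + k))).toList
        = (s.toList.drop (j + 1)).take k.toNat := by
      rw [PySem.Str.toList_slice, PySem.Chars.slice_eq_listSlice,
        PySem.List.slice_toNat s.toList (by omega : (0:Int) ≤ (j : Int) + 1) (by omega : (0:Int) ≤ (j : Int) + 1 + k)]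
      congr 1 <;> omega
    rw [← hsl]; exact (pv_contains_iff _).mp hc
  · rintro ⟨k, hk, hc⟩
    have hk0 : 0 ≤ k := pv_len_nonneg k hk
    refine ⟨k, hk, (pv_contains_iff _).mpr ?_⟩
    rw [PySem.Str.toList_slice, PySem.Chars.slice_eq_listSlice,
      PySem.List.slice_toNat s.toList (by omega : (0:Int) ≤ (j : Int) + 1) (by omega : (0:Int) ≤ (j : Int) + 1 + k)]
    rw [show ((j : Int) + 1).toNat = j + 1 from by omega]
    rw [show ((j : Int) + 1 + k).toNat - (j + 1) = k.toNat from by omega]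
    exact hc

-- the combinatorial heart: A's per-surname conditions ↔ B's window conditions, on any char list
theorem pv_core (L : List Char) :
    (∃ c ∈ pvCS, pvCondA c L) ↔
      ((∃ k ∈ pvSurnameLengths, L.take k.toNat ∈ pvCS ∧
          ((L.drop k.toNat).take 1 = [] ∨ (L.drop k.toNat).take 1 = [' '])) ∨
        (∃ j : Nat, ∃ _ : j < L.length, L[j] = ' ' ∧
          ∃ k ∈ pvSurnameLengths, (L.drop (j + 1)).take k.toNat ∈ pvCS)) := by
  constructor
  · rintro ⟨c, hc, hcond⟩
    have hkmem := pvCS_len_mem c hc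
    rcases hcond with h | h | h
    · -- c ++ [' '] prefix of L
      left
      refine ⟨(c.length : Int), hkmem, ?_⟩
      obtain ⟨t, ht⟩ := h
      rw [Int.toNat_natCast, ← ht]
      rw [List.append_assoc]
      constructor
      · rw [List.take_left]; exact hc
      · right; rw [List.drop_left]; rfl
    · -- L = c
      left
      refine ⟨(c.length : Int), hkmem, ?_⟩
      subst h
      rw [Int.toNat_natCast, List.take_length]
      exact ⟨hc, Or.inl (by simp)⟩
    · -- ' ' :: c infix of L
      right
      have := (PySem.Chars.exists_prefix_drop_iff_isIn (' ' :: c) L).mpr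
        ((PySem.Chars.isIn_iff_infix _ _).mpr h)
      obtain ⟨j, hpre⟩ := this
      have hj : j < L.length := by
        by_contra hle
        rw [List.drop_eq_nil_of_le (by omega)] at hpre
        exact absurd (List.prefix_nil.mp hpre) (by simp)
      rw [List.drop_eq_getElem_cons hj] at hpre
      obtain ⟨t, ht⟩ := hpre
      rw [List.cons_append] at ht
      injection ht with h1 h2
      refine ⟨j, hj, h1.symm, (c.length : Int), hkmem, ?_⟩
      rw [Int.toNat_natCast, ← h2, List.take_left]
      exact hc
  · rintro (⟨k, hk, hc, hend⟩ | ⟨j, hj, hsp, k, hk, hc⟩)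
    · rcases hend with he | he
      · -- k reaches the end: L itself is the surname
        have hlen : L.length ≤ k.toNat := by
          have := congrArg List.length he
          simp [List.length_take, List.length_drop] at this
          omega
        refine ⟨L.take k.toNat, ?_, Or.inr (Or.inl ?_)⟩
        · exact hc
        · rw [List.take_of_length_le hlen]
      · -- the surname is followed by a space
        have hlt : k.toNat < L.length := by
          by_contra hle
          rw [List.drop_eq_nil_of_le (by omega)] at he
          simp at he
        refine ⟨L.take k.toNat, hc, Or.inl ?_⟩
        have hsp : L[k.toNat] = ' ' := by
          have h0 := congrArg (fun l => l[0]?) he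
          simp [List.getElem?_take, List.getElem?_drop, List.getElem?_eq_getElem hlt] at h0
          exact h0
        refine ⟨L.drop (k.toNat + 1), ?_⟩
        conv_rhs => rw [← List.take_append_drop k.toNat L]
        rw [List.drop_eq_getElem_cons hlt, hsp, List.append_assoc]
        rfl
    · -- window after the space at position j
      refine ⟨(L.drop (j + 1)).take k.toNat, hc, Or.inr (Or.inr ?_)⟩
      rw [← PySem.Chars.isIn_iff_infix, ← PySem.Chars.exists_prefix_drop_iff_isIn]
      refine ⟨j, ?_⟩
      rw [List.drop_eq_getElem_cons hj, hsp]
      exact (List.cons_prefix_cons.mpr ⟨rfl, List.take_prefix _ _⟩)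

-- A's any-expression at character level
theorem pv_A_any_iff (nl : String) :
    (pvSurnames.any (fun surname =>
        (PySem.Str.startswith nl (surname ++ " ") || nl == surname)
          || PySem.Str.isIn (" " ++ surname) nl) = true) ↔
      ∃ c ∈ pvCS, pvCondA c nl.toList := by
  simp only [List.any_eq_true, Bool.or_eq_true, beq_iff_eq,
    PySem.Str.startswith_eq, PySem.Chars.startswith_iff, PySem.Str.isIn_iff_infix]
  constructor
  · rintro ⟨sur, hs, hcond⟩
    refine ⟨sur.toList, List.mem_map_of_mem hs, ?_⟩
    rcases hcond with (h | h) | h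
    · left; simpa using h
    · right; left; rw [h]
    · right; right; simpa using h
  · rintro ⟨c, hc, hcond⟩
    obtain ⟨sur, hs, rfl⟩ := List.mem_map.mp hc
    refine ⟨sur, hs, ?_⟩
    rcases hcond with h | h | h
    · left; left; simpa using h
    · left; right; exact String.toList_inj.mp h
    · right; simpa using h

-- B's any-expressions at character level
theorem pv_B_any_iff (s : String) :
    ((pvSurnameLengths.any (fun k => pvStartHit s k)
        || (PySem.List.enumerate s.toList).any (fun p => p.2 == ' ' && pvWindowHit s p.1)) = true) ↔
      ((∃ k ∈ pvSurnameLengths, s.toList.take k.toNat ∈ pvCS ∧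
          ((s.toList.drop k.toNat).take 1 = [] ∨ (s.toList.drop k.toNat).take 1 = [' '])) ∨
        (∃ j : Nat, ∃ _ : j < s.toList.length, s.toList[j] = ' ' ∧
          ∃ k ∈ pvSurnameLengths, (s.toList.drop (j + 1)).take k.toNat ∈ pvCS)) := by
  rw [Bool.or_eq_true]
  apply or_congr
  · simp only [List.any_eq_true]
    constructor
    · rintro ⟨k, hk, h⟩
      exact ⟨k, hk, (pv_startHit_iff s k (pv_len_nonneg k hk)).mp h⟩
    · rintro ⟨k, hk, h⟩
      exact ⟨k, hk, (pv_startHit_iff s k (pv_len_nonneg k hk)).mpr h⟩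
  · simp only [List.any_eq_true]
    constructor
    · rintro ⟨p, hp, hcond⟩
      rw [PySem.List.mem_enumerate_iff] at hp
      obtain ⟨j, hj, rfl⟩ := hp
      rw [Bool.and_eq_true, beq_iff_eq] at hcond
      obtain ⟨hsp, hw⟩ := hcond
      rw [zero_add] at hw
      exact ⟨j, hj, hsp, (pv_windowHit_iff s j).mp hw⟩
    · rintro ⟨j, hj, hsp, hw⟩
      refine ⟨((j : Int), s.toList[j]), ?_, ?_⟩
      · rw [PySem.List.mem_enumerate_iff]
        exact ⟨j, hj, by rw [zero_add]⟩
      · rw [Bool.and_eq_true, beq_iff_eq]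
        exact ⟨hsp, (pv_windowHit_iff s j).mpr hw⟩

-- ===== VERDICT (by name: the statement is the Claim_ definition above) =====
theorem is_chinese_name_spec : Claim_equal_is_chinese_name := by
  intro name _
  unfold Spec_is_chinese_name is_chinese_name is_chinese_name_alt
  by_cases hname : name = ""
  · simp [hname]
  · simp only [if_neg hname]
    rw [Bool.eq_iff_iff]
    rw [pv_A_any_iff (PySem.Str.lower name), pv_B_any_iff (PySem.Str.lower name)]
    exact pv_core (PySem.Str.lower name).toList
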